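-- pv_equiv track=rewrite | github.com/Record-Crash/motifle-discord | musicToSongs.py | best_download_url
-- ===== SOURCE A (Python) =====
-- def best_download_url(urls: list) -> tuple:
--     """Bandcamp > YouTube > SoundCloud."""
--     urls = [u for u in (urls or []) if u]
--     for u in urls:
--         if 'bandcamp' in u:
--             return u, 'bandcamp'
--     for u in urls:
--         if 'youtu' in u:
--             return u, 'youtube'
--     for u in urls:
--         if 'soundcloud' in u:
--             return u, 'soundcloud'
--     return None, None
-- ===== SOURCE B (Python) =====
-- def best_download_url(urls: list) -> tuple:
--     """Bandcamp > YouTube > SoundCloud."""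
--     urls = [u for u in (urls or []) if u]
--     fb = fy = fs = None
--     for u in urls:
--         if fb is None and 'bandcamp' in u:
--             fb = u
--         if fy is None and 'youtu' in u:
--             fy = u
--         if fs is None and 'soundcloud' in u:
--             fs = u
--     if fb is not None:
--         return fb, 'bandcamp'
--     if fy is not None:
--         return fy, 'youtube'
--     if fs is not None:
--         return fs, 'soundcloud'
--     return None, None
-- ===== Notes on version B (the rewrite author's own statement) =====
-- stated objective: alternative
-- what changed: Replaced A's three sequential scans of the filtered list (one per source) by a single pass that records the first match for each of the three substrings in its own slot, then selects the highest-priority non-empty slot.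
import Mathlib
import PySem

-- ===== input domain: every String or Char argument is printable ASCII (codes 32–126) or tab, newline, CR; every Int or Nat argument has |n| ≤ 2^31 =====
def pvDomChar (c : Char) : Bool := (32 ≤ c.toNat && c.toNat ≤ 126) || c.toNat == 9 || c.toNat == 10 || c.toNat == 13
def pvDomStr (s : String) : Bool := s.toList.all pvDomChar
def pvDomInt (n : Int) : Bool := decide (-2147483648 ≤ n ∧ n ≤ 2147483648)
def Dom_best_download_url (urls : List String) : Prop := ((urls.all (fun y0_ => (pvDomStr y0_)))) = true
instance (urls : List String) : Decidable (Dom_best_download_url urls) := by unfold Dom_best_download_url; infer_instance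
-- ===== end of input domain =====

-- B replaces A's three sequential scans by a single pass keeping a first-match slot per source, then selects by priority (alternative decomposition, same cost).


-- ===== PORT A =====
-- third loop: first url containing 'soundcloud', else (None, None)
def pvALoop3 : List String → Option String × Option String
  | [] => (none, none)
  | u :: rest => if PySem.Str.isIn "soundcloud" u then (some u, some "soundcloud") else pvALoop3 rest

-- second loop: first url containing 'youtu', else fall through to loop 3 over the whole list
def pvALoop2 (all : List String) : List String → Option String × Option String
  | [] => pvALoop3 all
  | u :: rest => if PySem.Str.isIn "youtu" u then (some u, some "youtube") else pvALoop2 all rest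

-- first loop: first url containing 'bandcamp', else fall through to loop 2 over the whole list
def pvALoop1 (all : List String) : List String → Option String × Option String
  | [] => pvALoop2 all all
  | u :: rest => if PySem.Str.isIn "bandcamp" u then (some u, some "bandcamp") else pvALoop1 all rest

def best_download_url (urls : List String) : Option String × Option String :=
  let urls := urls.filter (fun u => u ≠ "")   -- [u for u in (urls or []) if u] (truthiness of str = nonempty)
  pvALoop1 urls urls

-- ===== PORT B =====
-- single pass: each slot is set only the first time its substring matches
def pvBLoop : Option String → Option String → Option String → List String → Option String × Option String × Option String
  | fb, fy, fs, [] => (fb, fy, fs)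
  | fb, fy, fs, u :: rest =>
    pvBLoop (if fb.isNone && PySem.Str.isIn "bandcamp" u then some u else fb)
            (if fy.isNone && PySem.Str.isIn "youtu" u then some u else fy)
            (if fs.isNone && PySem.Str.isIn "soundcloud" u then some u else fs) rest

def best_download_url_alt (urls : List String) : Option String × Option String :=
  let urls := urls.filter (fun u => u ≠ "")
  match pvBLoop none none none urls with
  | (some u, _, _) => (some u, some "bandcamp")
  | (none, some u, _) => (some u, some "youtube")
  | (none, none, some u) => (some u, some "soundcloud")
  | (none, none, none) => (none, none)

-- ===== PRECONDITION & SPEC =====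
def Spec_best_download_url (urls : List String) (out : Option String × Option String) : Prop := out = best_download_url_alt urls
instance (urls : List String) (out : Option String × Option String) : Decidable (Spec_best_download_url urls out) := by unfold Spec_best_download_url; infer_instance

-- ===== CLAIM (what is proved, stated in full; the proofs are below) =====
def Claim_equal_best_download_url : Prop := ∀ (urls : List String), Dom_best_download_url urls → Spec_best_download_url urls (best_download_url urls)

-- ===== LEMMAS AND PROOFS =====

-- first element of l containing sub (characterises both programs' scans)
def pvFirst (sub : String) (l : List String) : Option String :=
  l.find? (fun u => PySem.Str.isIn sub u)

theorem pvBLoop_spec (l : List String) (fb fy fs : Option String) :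
    pvBLoop fb fy fs l =
      ((match fb with | some u => some u | none => pvFirst "bandcamp" l),
       (match fy with | some u => some u | none => pvFirst "youtu" l),
       (match fs with | some u => some u | none => pvFirst "soundcloud" l)) := by
  induction l generalizing fb fy fs with
  | nil => cases fb <;> cases fy <;> cases fs <;> rfl
  | cons u rest ih =>
      simp only [pvBLoop, ih, pvFirst, List.find?]
      cases fb <;> cases fy <;> cases fs <;>
        cases hb : PySem.Str.isIn "bandcamp" u <;>
        cases hy : PySem.Str.isIn "youtu" u <;>
        cases hs : PySem.Str.isIn "soundcloud" u <;>
        simp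

theorem pvALoop3_spec (l : List String) :
    pvALoop3 l = (match pvFirst "soundcloud" l with
                  | some u => (some u, some "soundcloud") | none => (none, none)) := by
  induction l with
  | nil => rfl
  | cons u rest ih =>
      simp only [pvALoop3, pvFirst, List.find?]
      cases hs : PySem.Str.isIn "soundcloud" u <;> simp [ih, pvFirst]

theorem pvALoop2_spec (all l : List String) :
    pvALoop2 all l = (match pvFirst "youtu" l with
                  | some u => (some u, some "youtube") | none => pvALoop3 all) := by
  induction l with
  | nil => rfl
  | cons u rest ih =>
      simp only [pvALoop2, pvFirst, List.find?]
      cases hy : PySem.Str.isIn "youtu" u <;> simp [ih, pvFirst]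

theorem pvALoop1_spec (all l : List String) :
    pvALoop1 all l = (match pvFirst "bandcamp" l with
                  | some u => (some u, some "bandcamp") | none => pvALoop2 all all) := by
  induction l with
  | nil => rfl
  | cons u rest ih =>
      simp only [pvALoop1, pvFirst, List.find?]
      cases hb : PySem.Str.isIn "bandcamp" u <;> simp [ih, pvFirst]

-- ===== VERDICT (by name: the statement is the Claim_ definition above) =====
theorem best_download_url_spec : Claim_equal_best_download_url := by
  intro urls _
  unfold Spec_best_download_url best_download_url best_download_url_alt
  simp only [pvALoop1_spec, pvALoop2_spec, pvALoop3_spec, pvBLoop_spec]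
  cases pvFirst "bandcamp" (urls.filter (fun u => u ≠ "")) <;>
    cases pvFirst "youtu" (urls.filter (fun u => u ≠ "")) <;>
      cases pvFirst "soundcloud" (urls.filter (fun u => u ≠ "")) <;> rfl
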